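-- pv_equiv track=rewrite | github.com/acm-projects/Rolemap | backend/main.py | prioritize_trusted_domains
-- ===== SOURCE A (Python) =====
-- from typing import List, Dict, Set, Optional, Tuple
--
-- def prioritize_trusted_domains(search_results: List[Dict], trusted_domains: List[str]) -> List[Dict]:
--     """Prioritize search results from trusted domains (from CSV files)."""
--     if not trusted_domains or not search_results:
--         return search_results
--
--     trusted_results = []
--     other_results = []
--
--     for result in search_results:
--         url = result.get('url', '').lower()
--         if any(domain in url for domain in trusted_domains):
--             trusted_results.append(result)
--         else:
--             other_results.append(result)
--
--     # Return trusted results first, then others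
--     return trusted_results + other_results
-- ===== SOURCE B (Python) =====
-- def prioritize_trusted_domains(search_results, trusted_domains):
--     """Prioritize search results from trusted domains (from CSV files)."""
--     if not trusted_domains or not search_results:
--         return search_results
--     return sorted(
--         search_results,
--         key=lambda r: 0 if any(d in r.get('url', '').lower() for d in trusted_domains) else 1,
--     )
-- ===== Notes on version B (the rewrite author's own statement) =====
-- stated objective: idiomatic
-- what changed: Replaced the explicit two-accumulator partition loop (trusted list + other list, concatenated) with a single stable sort on a 0/1 trust key; stability makes both groups keep their original order.
import Mathlib
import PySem

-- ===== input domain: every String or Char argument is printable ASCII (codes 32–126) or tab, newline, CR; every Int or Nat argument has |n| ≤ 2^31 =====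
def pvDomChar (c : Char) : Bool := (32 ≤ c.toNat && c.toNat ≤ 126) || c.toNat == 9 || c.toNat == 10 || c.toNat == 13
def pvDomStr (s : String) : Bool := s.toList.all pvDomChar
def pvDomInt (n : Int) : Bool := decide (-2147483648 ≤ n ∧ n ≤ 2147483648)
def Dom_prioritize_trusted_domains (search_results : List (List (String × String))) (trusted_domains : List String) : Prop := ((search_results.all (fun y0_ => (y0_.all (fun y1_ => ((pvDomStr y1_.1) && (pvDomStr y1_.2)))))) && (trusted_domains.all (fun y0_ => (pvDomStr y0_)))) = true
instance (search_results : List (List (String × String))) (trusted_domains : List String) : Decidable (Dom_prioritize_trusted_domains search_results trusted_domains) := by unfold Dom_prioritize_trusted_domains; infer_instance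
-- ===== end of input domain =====

-- B replaces A's explicit two-accumulator partition loop with a single stable sort on a 0/1 trust key (idiomatic; same result, same order).


-- shared helper: `any(domain in url for domain in trusted_domains)` with url = result.get('url','').lower()
-- (this exact expression appears in both Python versions)
def pvTrusted (trusted_domains : List String) (result : List (String × String)) : Bool :=
  trusted_domains.any (fun domain => PySem.Str.isIn domain (PySem.Str.lower ((PySem.Dict.mk result).getD "url" "")))

-- ===== PORT A =====
def prioritize_trusted_domains (search_results : List (List (String × String))) (trusted_domains : List String) : List (List (String × String)) :=
  if trusted_domains = [] ∨ search_results = [] then search_results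
  else
    let p := search_results.foldl
      (fun (acc : List (List (String × String)) × List (List (String × String))) result =>
        if pvTrusted trusted_domains result then (acc.1 ++ [result], acc.2)
        else (acc.1, acc.2 ++ [result]))
      ([], [])
    p.1 ++ p.2

-- ===== PORT B =====
def prioritize_trusted_domains_alt (search_results : List (List (String × String))) (trusted_domains : List String) : List (List (String × String)) :=
  if trusted_domains = [] ∨ search_results = [] then search_results
  else PySem.List.sorted search_results (fun r => if pvTrusted trusted_domains r then (0 : Int) else 1) false

-- ===== PRECONDITION & SPEC =====
def Spec_prioritize_trusted_domains (search_results : List (List (String × String))) (trusted_domains : List String) (out : List (List (String × String))) : Prop := out = prioritize_trusted_domains_alt search_results trusted_domains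
instance (search_results : List (List (String × String))) (trusted_domains : List String) (out : List (List (String × String))) : Decidable (Spec_prioritize_trusted_domains search_results trusted_domains out) := by unfold Spec_prioritize_trusted_domains; infer_instance

-- ===== CLAIM (what is proved, stated in full; the proofs are below) =====
def Claim_equal_prioritize_trusted_domains : Prop := ∀ (search_results : List (List (String × String))) (trusted_domains : List String), Dom_prioritize_trusted_domains search_results trusted_domains → Spec_prioritize_trusted_domains search_results trusted_domains (prioritize_trusted_domains search_results trusted_domains)

-- ===== LEMMAS AND PROOFS =====

-- Inserting x into t ++ o where all of t has key 0 and all of o has key 1: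
-- a key-0 element lands between t and o, a key-1 element at the very end.
theorem pv_insertBy_bin {α : Type} (key : α → Int) (x : α) (t o : List α)
    (ht : ∀ y ∈ t, key y = 0) (ho : ∀ y ∈ o, key y = 1) (hx : key x = 0 ∨ key x = 1) :
    PySem.List.insertBy (fun a b => decide (key a < key b)) x (t ++ o) =
      if key x = 0 then t ++ x :: o else (t ++ o) ++ [x] := by
  induction t with
  | nil =>
    induction o with
    | nil => simp [PySem.List.insertBy]
    | cons y ys ih =>
      have hy : key y = 1 := ho y (by simp)
      rcases hx with h0 | h1
      · simp [PySem.List.insertBy, h0, hy]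
      · have : ¬ (key x < key y) := by omega
        simp only [List.nil_append, PySem.List.insertBy, decide_eq_true_eq, this, if_false]
        have := ih (fun z hz => ho z (by simp [hz]))
        simp only [List.nil_append] at this
        simp [this, h1, show (1:Int) ≠ 0 by norm_num]
  | cons y ys ih =>
    have hy : key y = 0 := ht y (by simp)
    have hlt : ¬ (key x < key y) := by rcases hx with h | h <;> omega
    have := ih (fun z hz => ht z (by simp [hz]))
    simp only [List.cons_append, PySem.List.insertBy, decide_eq_true_eq, hlt, if_false, this]
    split <;> simp

-- The whole insertion-sort fold with accumulator t ++ o (t all key 0, o all key 1)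
-- is the two filters appended.
theorem pv_foldl_insertBy_bin {α : Type} (key : α → Int) (xs t o : List α)
    (ht : ∀ y ∈ t, key y = 0) (ho : ∀ y ∈ o, key y = 1)
    (hall : ∀ x ∈ xs, key x = 0 ∨ key x = 1) :
    xs.foldl (fun acc x => PySem.List.insertBy (fun a b => decide (key a < key b)) x acc) (t ++ o) =
      (t ++ xs.filter (fun x => decide (key x = 0))) ++ (o ++ xs.filter (fun x => !decide (key x = 0))) := by
  induction xs generalizing t o with
  | nil => simp
  | cons x xs ih =>
    have hx := hall x (by simp)
    have hstep := pv_insertBy_bin key x t o ht ho hx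
    simp only [List.foldl_cons, hstep]
    have htail : ∀ z ∈ xs, key z = 0 ∨ key z = 1 := fun z hz => hall z (by simp [hz])
    by_cases h0 : key x = 0
    · have ht' : ∀ y ∈ t ++ [x], key y = 0 := by
        intro y hy
        rcases List.mem_append.mp hy with h | h
        · exact ht y h
        · simp at h; simpa [h] using h0
      have heq : t ++ x :: o = (t ++ [x]) ++ o := by simp
      rw [if_pos h0, heq, ih (t ++ [x]) o ht' ho htail]
      simp [h0]
    · have h1 : key x = 1 := by rcases hx with h | h; exact absurd h h0; exact h
      have ho' : ∀ y ∈ o ++ [x], key y = 1 := by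
        intro y hy
        rcases List.mem_append.mp hy with h | h
        · exact ho y h
        · simp at h; simpa [h] using h1
      have heq : (t ++ o) ++ [x] = t ++ (o ++ [x]) := by simp
      rw [if_neg h0, heq, ih t (o ++ [x]) ht ho' htail]
      simp [h0]

-- A's two-accumulator partition loop is the two filters appended.
theorem pv_foldl_partition {α : Type} (p : α → Bool) (xs t o : List α) :
    xs.foldl (fun (acc : List α × List α) x =>
        if p x then (acc.1 ++ [x], acc.2) else (acc.1, acc.2 ++ [x])) (t, o) =
      (t ++ xs.filter p, o ++ xs.filter (fun x => !p x)) := by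
  induction xs generalizing t o with
  | nil => simp
  | cons x xs ih =>
    by_cases h : p x
    · simp [h, ih]
    · simp [h, ih]

-- ===== VERDICT (by name: the statement is the Claim_ definition above) =====
theorem prioritize_trusted_domains_spec : Claim_equal_prioritize_trusted_domains := by
  intro search_results trusted_domains _
  unfold Spec_prioritize_trusted_domains prioritize_trusted_domains prioritize_trusted_domains_alt
  by_cases hguard : trusted_domains = [] ∨ search_results = []
  · simp [hguard]
  · rw [if_neg hguard, if_neg hguard]
    set key : List (String × String) → Int :=
      fun r => if pvTrusted trusted_domains r then (0 : Int) else 1 with hkey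
    have hsorted := PySem.List.sorted_eq_foldl_insertBy search_results key
    have hfold := pv_foldl_insertBy_bin key search_results [] []
      (by simp) (by simp)
      (by intro x _; by_cases h : pvTrusted trusted_domains x <;> simp [hkey, h])
    simp only [List.nil_append] at hfold
    rw [hsorted, hfold]
    rw [pv_foldl_partition (pvTrusted trusted_domains) search_results [] []]
    have hfe : ∀ x, (decide (key x = 0)) = pvTrusted trusted_domains x := by
      intro x; by_cases h : pvTrusted trusted_domains x <;> simp [hkey, h]
    simp [hfe]
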